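-- pv_equiv track=rewrite | github.com/ippyk/Advent-of-Code-2024 | day_22/22.2.py | next_secret
-- ===== SOURCE A (Python) =====
-- from collections import deque
--
-- def next_secret(num, iters):
--
--     seen = set()
--     numdict = {}
--     storage = deque(maxlen=4)
--
--     for i in range(iters):
--         new1 = num * 64
--         new_num = num ^ new1
--         new_num = new_num % 16777216
--
--         new2 = new_num // 32
--         new_num = new_num ^ new2
--         new_num = new_num % 16777216
--
--         new3 = new_num * 2048
--         new_num = new_num ^ new3
--         new_num = new_num % 16777216
--         change = int(str(new_num)[-1]) - int(str(num)[-1])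
--         num = new_num
--
--         storage.append(change)
--         if (len(storage)>= 4) and ((storage[0],storage[1],storage[2],storage[3]) not in numdict):
--             numdict[(storage[0],storage[1],storage[2],storage[3])] = int(str(new_num)[-1])
--
--     return new_num, numdict
-- ===== SOURCE B (Python) =====
-- def next_secret(num, iters):
--     # Same return value as A; like A it raises UnboundLocalError when iters <= 0
--     # (new_num is loop-local). Two-phase decomposition: generate the price list
--     # first, then build the pattern dict in a second pass over it.
--     prices = [abs(num) % 10]
--     for _ in range(iters):
--         num = (num ^ (num * 64)) % 16777216
--         num = (num ^ (num // 32)) % 16777216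
--         new_num = (num ^ (num * 2048)) % 16777216
--         num = new_num
--         prices.append(new_num % 10)
--     numdict = {}
--     for i in range(4, len(prices)):
--         key = (prices[i - 3] - prices[i - 4], prices[i - 2] - prices[i - 3],
--                prices[i - 1] - prices[i - 2], prices[i] - prices[i - 1])
--         if key not in numdict:
--             numdict[key] = prices[i]
--     return new_num, numdict
-- ===== Notes on version B (the rewrite author's own statement) =====
-- stated objective: alternative
-- what changed: Replaces the single loop that slides a deque window and converts numbers through str() each iteration by a two-phase decomposition: one pure generation loop collecting last-digit prices via % 10, then a second index pass over the price list that forms each 4-difference window and fills the dict.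
import Mathlib
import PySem

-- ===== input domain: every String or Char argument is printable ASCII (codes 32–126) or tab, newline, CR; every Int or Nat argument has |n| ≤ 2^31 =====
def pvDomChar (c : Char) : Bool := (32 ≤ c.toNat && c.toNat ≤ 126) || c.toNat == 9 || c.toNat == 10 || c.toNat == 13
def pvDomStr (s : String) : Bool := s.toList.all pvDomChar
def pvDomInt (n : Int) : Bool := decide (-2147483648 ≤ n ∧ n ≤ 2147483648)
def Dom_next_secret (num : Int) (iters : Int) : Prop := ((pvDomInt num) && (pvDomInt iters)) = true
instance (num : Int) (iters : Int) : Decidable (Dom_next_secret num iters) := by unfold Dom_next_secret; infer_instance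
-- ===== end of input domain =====

-- B replaces A's deque window + per-iteration str() digit extraction by a two-phase
-- decomposition: generate the price list first, then a second index pass builds the dict.

-- ===== PORT A =====
-- int(str(n)[-1]) : last character of str(n) parsed back as an int.
-- str(n) is never empty, so the `none` branch of pyGet? is unreachable.
def pvLastDigit (n : Int) : Int :=
  match PySem.List.pyGet? (PySem.Int.toChars n) (-1) with
  | some c => (PySem.Int.ofChars? [c]).getD 0
  | none => 0

-- one iteration of A's loop; state = (num, storage, numdict).  (A's `seen` set is
-- created and never used, so it is not part of the state.)
def pvStepA (st : Int × List Int × PySem.Dict (List Int) Int) :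
    Int × List Int × PySem.Dict (List Int) Int :=
  let num := st.1
  let storage := st.2.1
  let numdict := st.2.2
  let new1 := num * 64
  let x1 := PySem.Int.mod (PySem.Int.bxor num new1) 16777216
  let new2 := PySem.Int.floordiv x1 32
  let x2 := PySem.Int.mod (PySem.Int.bxor x1 new2) 16777216
  let new3 := x2 * 2048
  let new_num := PySem.Int.mod (PySem.Int.bxor x2 new3) 16777216
  let change := pvLastDigit new_num - pvLastDigit num
  -- deque(maxlen=4).append: drop the leftmost element once the deque is full
  let storage' := if storage.length = 4 then storage.tail ++ [change] else storage ++ [change]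
  let key := [PySem.List.pyGetD storage' 0 0, PySem.List.pyGetD storage' 1 0,
              PySem.List.pyGetD storage' 2 0, PySem.List.pyGetD storage' 3 0]
  let numdict' := if 4 ≤ storage'.length ∧ numdict.contains key = false
                  then numdict.insert key (pvLastDigit new_num) else numdict
  (new_num, storage', numdict')

-- after ≥ 1 iterations (Pre_) Python's loop-local new_num equals num, returned here
def next_secret (num : Int) (iters : Int) : Int × (List (List Int × Int)) :=
  let r := (PySem.List.pyRange 0 iters 1).foldl (fun st _ => pvStepA st)
    (num, ([], PySem.Dict.empty))
  (r.1, r.2.2.items)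

-- ===== PORT B =====
-- one iteration of B's generation loop; state = (num, prices)
def pvStepB (st : Int × List Int) : Int × List Int :=
  let num1 := PySem.Int.mod (PySem.Int.bxor st.1 (st.1 * 64)) 16777216
  let num2 := PySem.Int.mod (PySem.Int.bxor num1 (PySem.Int.floordiv num1 32)) 16777216
  let new_num := PySem.Int.mod (PySem.Int.bxor num2 (num2 * 2048)) 16777216
  (new_num, st.2 ++ [PySem.Int.mod new_num 10])

-- the 4-difference window ending at index i of prices
def pvKeyAt (prices : List Int) (i : Int) : List Int :=
  [PySem.List.pyGetD prices (i-3) 0 - PySem.List.pyGetD prices (i-4) 0,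
   PySem.List.pyGetD prices (i-2) 0 - PySem.List.pyGetD prices (i-3) 0,
   PySem.List.pyGetD prices (i-1) 0 - PySem.List.pyGetD prices (i-2) 0,
   PySem.List.pyGetD prices i 0 - PySem.List.pyGetD prices (i-1) 0]

def next_secret_alt (num : Int) (iters : Int) : Int × (List (List Int × Int)) :=
  let gen := (PySem.List.pyRange 0 iters 1).foldl (fun st _ => pvStepB st)
    (num, [PySem.Int.mod (num.natAbs : Int) 10])          -- abs(num) % 10
  let prices := gen.2
  let numdict := (PySem.List.pyRange 4 (prices.length : Int) 1).foldl
    (fun d i =>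
      let key := pvKeyAt prices i
      if d.contains key then d else d.insert key (PySem.List.pyGetD prices i 0))
    PySem.Dict.empty
  (gen.1, numdict.items)

-- ===== PRECONDITION & SPEC =====
-- On iters ≤ 0 the loop body never runs and Python A raises UnboundLocalError on
-- `return new_num` (B raises identically); those inputs are excluded.
def Pre_next_secret (num : Int) (iters : Int) : Prop := 1 ≤ iters
instance (num : Int) (iters : Int) : Decidable (Pre_next_secret num iters) := by unfold Pre_next_secret; infer_instance
def pvWitness_next_secret : Int × Int := (123, 6)

def Spec_next_secret (num : Int) (iters : Int) (out : Int × (List (List Int × Int))) : Prop := out = next_secret_alt num iters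
instance (num : Int) (iters : Int) (out : Int × (List (List Int × Int))) : Decidable (Spec_next_secret num iters out) := by unfold Spec_next_secret; infer_instance

-- ===== CLAIM (what is proved, stated in full; the proofs are below) =====
def Claim_equal_next_secret : Prop := ∀ (num : Int) (iters : Int), Dom_next_secret num iters → Pre_next_secret num iters → Spec_next_secret num iters (next_secret num iters)

-- ===== LEMMAS AND PROOFS =====

-- the 3-stage hash both programs apply each iteration
def pvHash (n : Int) : Int :=
  let x1 := PySem.Int.mod (PySem.Int.bxor n (n * 64)) 16777216
  let x2 := PySem.Int.mod (PySem.Int.bxor x1 (PySem.Int.floordiv x1 32)) 16777216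
  PySem.Int.mod (PySem.Int.bxor x2 (x2 * 2048)) 16777216

-- the secret after j iterations
def pvSec (num : Int) : Nat → Int
  | 0 => num
  | j + 1 => pvHash (pvSec num j)

-- the price (last decimal digit) after j iterations
def pvP (num : Int) : Nat → Int
  | 0 => PySem.Int.mod (num.natAbs : Int) 10
  | j + 1 => PySem.Int.mod (pvSec num (j + 1)) 10

-- the price change at iteration t (t ≥ 1)
def pvC (num : Int) (t : Nat) : Int := pvP num t - pvP num (t - 1)

-- the list of the first n changes
def pvChs (num : Int) (n : Nat) : List Int := (List.range n).map (fun j => pvC num (j + 1))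

-- A's deque contents after n iterations
def pvStor (num : Int) (n : Nat) : List Int := (pvChs num n).drop (n - 4)

-- the dict after the first n iterations have been taken into account
def pvDA (num : Int) : Nat → PySem.Dict (List Int) Int
  | 0 => PySem.Dict.empty
  | n + 1 =>
    let d := pvDA num n
    if 4 ≤ n + 1 then
      let key := [pvC num (n - 2), pvC num (n - 1), pvC num n, pvC num (n + 1)]
      if d.contains key then d else d.insert key (pvP num (n + 1))
    else d

-- B's price list after n iterations
def pvPl (num : Int) (n : Nat) : List Int := (List.range (n + 1)).map (pvP num)

lemma pv_foldl_const {α β : Type} (F : α → α) (l : List β) (i : α) :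
    l.foldl (fun s _ => F s) i = F^[l.length] i := by
  induction l generalizing i with
  | nil => rfl
  | cons x xs ih => simp [List.foldl_cons, ih, Function.iterate_succ_apply]

lemma pv_tdc_unfold (f n : Nat) (ds : List Char) :
    Nat.toDigitsCore 10 (f + 1) n ds
      = if n / 10 = 0 then (n % 10).digitChar :: ds
        else Nat.toDigitsCore 10 f (n / 10) ((n % 10).digitChar :: ds) := rfl

lemma pv_tdc_last (fuel : Nat) : ∀ (n : Nat) (ds : List Char),
    ∃ pre, Nat.toDigitsCore 10 (fuel + 1) n ds = pre ++ ((n % 10).digitChar :: ds) := by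
  induction fuel with
  | zero =>
    intro n ds
    rw [pv_tdc_unfold]
    split
    · exact ⟨[], rfl⟩
    · exact ⟨[], rfl⟩
  | succ f ih =>
    intro n ds
    rw [pv_tdc_unfold]
    split
    · exact ⟨[], rfl⟩
    · obtain ⟨pre, hp⟩ := ih (n / 10) ((n % 10).digitChar :: ds)
      exact ⟨pre ++ [((n / 10) % 10).digitChar], by rw [hp]; simp⟩

lemma pv_toDigits_last (m : Nat) : ∃ pre, Nat.toDigits 10 m = pre ++ [(m % 10).digitChar] :=
  pv_tdc_last m m []

lemma pv_digit_ofChars (d : Nat) (h : d < 10) : PySem.Int.ofChars? [d.digitChar] = some (d : Int) := by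
  interval_cases d <;> decide

lemma pv_lastDigit_eq (n : Int) : pvLastDigit n = ((n.natAbs % 10 : Nat) : Int) := by
  unfold pvLastDigit
  rcases pv_toDigits_last n.natAbs with ⟨pre, hp⟩
  rcases lt_or_ge n 0 with hn | hn
  · have ht : PySem.Int.toChars n = ('-' :: pre) ++ [(n.natAbs % 10).digitChar] := by
      simp [PySem.Int.toChars, hn, hp]
    rw [ht, PySem.List.pyGet?_neg_one_append_singleton]
    simp [pv_digit_ofChars _ (Nat.mod_lt _ (by norm_num))]
  · have ht : PySem.Int.toChars n = pre ++ [(n.natAbs % 10).digitChar] := by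
      have h2 : n.toNat = n.natAbs := by omega
      simp [PySem.Int.toChars, not_lt.mpr hn, h2, hp]
    rw [ht, PySem.List.pyGet?_neg_one_append_singleton]
    simp [pv_digit_ofChars _ (Nat.mod_lt _ (by norm_num))]

lemma pv_sec_nonneg (num : Int) (j : Nat) : 0 ≤ pvSec num (j + 1) := by
  show 0 ≤ PySem.Int.mod _ 16777216
  exact PySem.Int.mod_nonneg _ (by norm_num)

lemma pv_lastDigit_sec (num : Int) (j : Nat) : pvLastDigit (pvSec num j) = pvP num j := by
  cases j with
  | zero =>
    rw [pv_lastDigit_eq]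
    have hs : pvSec num 0 = num := rfl
    rw [hs]
    show _ = PySem.Int.mod (num.natAbs : Int) 10
    rw [PySem.Int.mod_eq_emod_of_pos (by norm_num)]
    omega
  | succ j =>
    rw [pv_lastDigit_eq]
    have hn := pv_sec_nonneg num j
    show _ = PySem.Int.mod (pvSec num (j + 1)) 10
    rw [PySem.Int.mod_eq_emod_of_pos (by norm_num)]
    omega

lemma pv_chs_succ (num : Int) (n : Nat) :
    pvChs num (n + 1) = pvChs num n ++ [pvC num (n + 1)] := by
  simp [pvChs, List.range_succ]

lemma pv_length_chs (num : Int) (n : Nat) : (pvChs num n).length = n := by simp [pvChs]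

lemma pv_length_stor (num : Int) (n : Nat) : (pvStor num n).length = min n 4 := by
  simp [pvStor, pv_length_chs]; omega

lemma pv_stor_succ (num : Int) (n : Nat) :
    (if (pvStor num n).length = 4 then (pvStor num n).tail ++ [pvC num (n + 1)]
     else pvStor num n ++ [pvC num (n + 1)]) = pvStor num (n + 1) := by
  rcases le_or_gt 4 n with h4 | h4
  · rw [if_pos (by rw [pv_length_stor]; omega)]
    unfold pvStor
    rw [List.tail_drop, pv_chs_succ,
        List.drop_append_of_le_length (by rw [pv_length_chs]; omega)]
    congr 2
    omega
  · rw [if_neg (by rw [pv_length_stor]; omega)]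
    unfold pvStor
    rw [pv_chs_succ, List.drop_append_of_le_length (by rw [pv_length_chs]; omega)]
    have e1 : n - 4 = 0 := by omega
    have e2 : n + 1 - 4 = 0 := by omega
    rw [e1, e2]

lemma pv_stor_get (num : Int) (n k : Nat) (h3 : 3 ≤ n) (hk : k < 4) :
    PySem.List.pyGetD (pvStor num (n + 1)) (k : Int) 0 = pvC num (n - 2 + k) := by
  have hlen : (pvStor num (n + 1)).length = 4 := by rw [pv_length_stor]; omega
  rw [PySem.List.pyGetD_natCast, List.getD_eq_getElem _ _ (by omega)]
  unfold pvStor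
  rw [List.getElem_drop]
  unfold pvChs
  rw [List.getElem_map, List.getElem_range]
  congr 1
  omega

lemma pv_stepA_def (s : Int) (storage : List Int) (d : PySem.Dict (List Int) Int) :
    pvStepA (s, storage, d) =
      (pvHash s, (if storage.length = 4 then storage.tail ++ [pvLastDigit (pvHash s) - pvLastDigit s] else storage ++ [pvLastDigit (pvHash s) - pvLastDigit s]),
       if 4 ≤ ((if storage.length = 4 then storage.tail ++ [pvLastDigit (pvHash s) - pvLastDigit s] else storage ++ [pvLastDigit (pvHash s) - pvLastDigit s])).length ∧ d.contains [PySem.List.pyGetD (if storage.length = 4 then storage.tail ++ [pvLastDigit (pvHash s) - pvLastDigit s] else storage ++ [pvLastDigit (pvHash s) - pvLastDigit s]) 0 0, PySem.List.pyGetD (if storage.length = 4 then storage.tail ++ [pvLastDigit (pvHash s) - pvLastDigit s] else storage ++ [pvLastDigit (pvHash s) - pvLastDigit s]) 1 0, PySem.List.pyGetD (if storage.length = 4 then storage.tail ++ [pvLastDigit (pvHash s) - pvLastDigit s] else storage ++ [pvLastDigit (pvHash s) - pvLastDigit s]) 2 0, PySem.List.pyGetD (if storage.length = 4 then storage.tail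 ++ [pvLastDigit (pvHash s) - pvLastDigit s] else storage ++ [pvLastDigit (pvHash s) - pvLastDigit s]) 3 0] = false
       then d.insert [PySem.List.pyGetD (if storage.length = 4 then storage.tail ++ [pvLastDigit (pvHash s) - pvLastDigit s] else storage ++ [pvLastDigit (pvHash s) - pvLastDigit s]) 0 0, PySem.List.pyGetD (if storage.length = 4 then storage.tail ++ [pvLastDigit (pvHash s) - pvLastDigit s] else storage ++ [pvLastDigit (pvHash s) - pvLastDigit s]) 1 0, PySem.List.pyGetD (if storage.length = 4 then storage.tail ++ [pvLastDigit (pvHash s) - pvLastDigit s] else storage ++ [pvLastDigit (pvHash s) - pvLastDigit s]) 2 0, PySem.List.pyGetD (if storage.length = 4 then storage.tail ++ [pvLastDigit (pvHash s) - pvLastDigit s] else storage ++ [pvLastDigit (pvHash s) - pvLastDigit s]) 3 0] (pvLastDigit (pvHash s)) else d) := rfl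

lemma pv_stepA_eq (num : Int) (n : Nat) :
    pvStepA (pvSec num n, pvStor num n, pvDA num n)
      = (pvSec num (n + 1), pvStor num (n + 1), pvDA num (n + 1)) := by
  have hhash : pvHash (pvSec num n) = pvSec num (n + 1) := rfl
  have hc : pvP num (n + 1) - pvP num n = pvC num (n + 1) := rfl
  rw [pv_stepA_def, hhash, pv_lastDigit_sec num (n + 1), pv_lastDigit_sec num n, hc,
      pv_stor_succ]
  rcases lt_or_ge n 3 with h3 | h3
  · rw [if_neg (fun h => by rw [pv_length_stor] at h; omega : ¬ _)]
    conv_rhs => rw [show pvDA num (n + 1) = pvDA num n from by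
      conv_lhs => unfold pvDA
      rw [if_neg (by omega)]]
  · have g0 : PySem.List.pyGetD (pvStor num (n + 1)) 0 0 = pvC num (n - 2) := by
      simpa using pv_stor_get num n 0 h3 (by norm_num)
    have g1 : PySem.List.pyGetD (pvStor num (n + 1)) 1 0 = pvC num (n - 1) := by
      have e : n - 2 + 1 = n - 1 := by omega
      simpa [e] using pv_stor_get num n 1 h3 (by norm_num)
    have g2 : PySem.List.pyGetD (pvStor num (n + 1)) 2 0 = pvC num n := by
      have e : n - 2 + 2 = n := by omega
      simpa [e] using pv_stor_get num n 2 h3 (by norm_num)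
    have g3 : PySem.List.pyGetD (pvStor num (n + 1)) 3 0 = pvC num (n + 1) := by
      have e : n - 2 + 3 = n + 1 := by omega
      simpa [e] using pv_stor_get num n 3 h3 (by norm_num)
    rw [g0, g1, g2, g3]
    conv_rhs => rw [show pvDA num (n + 1)
        = (if (pvDA num n).contains [pvC num (n - 2), pvC num (n - 1), pvC num n, pvC num (n + 1)] then pvDA num n
           else (pvDA num n).insert [pvC num (n - 2), pvC num (n - 1), pvC num n, pvC num (n + 1)] (pvP num (n + 1))) from by
      conv_lhs => unfold pvDA
      rw [if_pos (by omega)]]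
    by_cases hcon : (pvDA num n).contains [pvC num (n - 2), pvC num (n - 1), pvC num n, pvC num (n + 1)] = true
    · rw [if_neg (by simp [hcon]), if_pos hcon]
    · have hcf : (pvDA num n).contains [pvC num (n - 2), pvC num (n - 1), pvC num n, pvC num (n + 1)] = false := by simpa using hcon
      rw [if_pos ⟨by rw [pv_length_stor]; omega, hcf⟩, if_neg (by simp [hcf])]

lemma pv_iterA (num : Int) (n : Nat) :
    pvStepA^[n] (num, ([], PySem.Dict.empty)) = (pvSec num n, pvStor num n, pvDA num n) := by
  induction n with
  | zero => rfl
  | succ n ih => rw [Function.iterate_succ_apply', ih, pv_stepA_eq]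

lemma pv_pl_succ (num : Int) (n : Nat) :
    pvPl num (n + 1) = pvPl num n ++ [pvP num (n + 1)] := by
  simp [pvPl, List.range_succ]

lemma pv_iterB (num : Int) (n : Nat) :
    pvStepB^[n] (num, [PySem.Int.mod (num.natAbs : Int) 10]) = (pvSec num n, pvPl num n) := by
  induction n with
  | zero => rfl
  | succ n ih =>
    rw [Function.iterate_succ_apply', ih, pv_pl_succ]
    rfl

lemma pv_pl_getD (num : Int) (N j : Nat) (h : j ≤ N) :
    PySem.List.pyGetD (pvPl num N) (j : Int) 0 = pvP num j := by
  rw [PySem.List.pyGetD_natCast, List.getD_eq_getElem _ _ (by simp [pvPl]; omega)]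
  unfold pvPl
  rw [List.getElem_map, List.getElem_range]

lemma pv_dictB (num : Int) (N : Nat) (m : Nat) (hm : m ≤ N) :
    (PySem.List.pyRange 4 ((m : Int) + 1) 1).foldl
      (fun d i =>
        let key := pvKeyAt (pvPl num N) i
        if d.contains key then d else d.insert key (PySem.List.pyGetD (pvPl num N) i 0))
      PySem.Dict.empty = pvDA num m := by
  induction m with
  | zero =>
    rw [PySem.List.pyRange_one_eq_nil (by norm_num)]
    rfl
  | succ m ih =>
    rcases lt_or_ge (m + 1) 4 with h4 | h4
    · rw [PySem.List.pyRange_one_eq_nil (by push_cast; omega)]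
      have h0 : pvDA num m = PySem.Dict.empty := by
        rw [← ih (by omega), PySem.List.pyRange_one_eq_nil (by push_cast; omega)]
        rfl
      show PySem.Dict.empty = pvDA num (m + 1)
      conv_rhs => unfold pvDA
      rw [if_neg (by omega)]
      exact h0.symm
    · have hcast : ((m + 1 : Nat) : Int) + 1 = ((m : Int) + 1) + 1 := by push_cast; ring
      rw [hcast, PySem.List.pyRange_one_succ_right (by push_cast; omega),
          List.foldl_append, ih (by omega)]
      simp only [List.foldl_cons, List.foldl_nil]
      have e0 : ((m : Int) + 1) - 3 = ((m - 2 : Nat) : Int) := by omega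
      have e1 : ((m : Int) + 1) - 4 = ((m - 3 : Nat) : Int) := by omega
      have e2 : ((m : Int) + 1) - 2 = ((m - 1 : Nat) : Int) := by omega
      have e3 : ((m : Int) + 1) - 1 = ((m : Nat) : Int) := by omega
      have e4 : ((m : Int) + 1) = ((m + 1 : Nat) : Int) := by omega
      have hkey : pvKeyAt (pvPl num N) ((m : Int) + 1) = [pvC num (m - 2), pvC num (m - 1), pvC num m, pvC num (m + 1)] := by
        unfold pvKeyAt
        rw [e0, e1, e2, e3, e4,
            pv_pl_getD num N _ (by omega), pv_pl_getD num N _ (by omega),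
            pv_pl_getD num N _ (by omega), pv_pl_getD num N _ (by omega),
            pv_pl_getD num N _ (by omega)]
        unfold pvC
        have f0 : m - 2 - 1 = m - 3 := by omega
        have f1 : m - 1 - 1 = m - 2 := by omega
        have f3 : m + 1 - 1 = m := by omega
        rw [f0, f1, f3]
      have hval : PySem.List.pyGetD (pvPl num N) ((m : Int) + 1) 0 = pvP num (m + 1) := by
        rw [e4]; exact pv_pl_getD num N (m + 1) (by omega)
      conv_rhs => rw [show pvDA num (m + 1)
          = (if (pvDA num m).contains [pvC num (m - 2), pvC num (m - 1), pvC num m, pvC num (m + 1)] then pvDA num m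
             else (pvDA num m).insert [pvC num (m - 2), pvC num (m - 1), pvC num m, pvC num (m + 1)] (pvP num (m + 1))) from by
        conv_lhs => unfold pvDA
        rw [if_pos (by omega)]]
      simp only [hkey, hval]

-- ===== VERDICT (by name: the statement is the Claim_ definition above) =====
theorem next_secret_spec : Claim_equal_next_secret := by
  intro num iters _hd _hp
  unfold Spec_next_secret next_secret next_secret_alt
  simp only [pv_foldl_const, PySem.List.length_pyRange_one, pv_iterA, pv_iterB]
  have hN : ((pvPl num (iters - 0).toNat).length : Int) = ((iters - 0).toNat : Int) + 1 := by
    simp [pvPl]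
  simp only [hN]
  rw [pv_dictB num _ _ le_rfl]
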